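-- pv_equiv track=rewrite | github.com/GiacomoPauletti/Benchmarking-AI-Factories | examples/stress_test_conversation.py | create_conversation_turns
-- ===== SOURCE A (Python) =====
-- from typing import List, Dict, Tuple
--
-- def create_conversation_turns(
--     initial_prompts: List[str],
--     max_turns: int = 5
-- ) -> Dict[int, List[str]]:
--     """Create conversation prompts with varying numbers of turns.
--
--     Args:
--         initial_prompts: Starting conversation prompts
--         max_turns: Maximum conversation depth to simulate
--
--     Returns:
--         Dict mapping turn count to list of prompts with that much history
--     """
--     conversation_turns = {}
--
--     # Simulated conversation patterns
--     follow_ups = [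
--         "Can you elaborate on that?",
--         "That's interesting. Tell me more.",
--         "I see. What else should I know?",
--         "Thanks! Can you give me an example?",
--         "How does that work in practice?",
--         "What are the key takeaways?",
--         "Could you clarify that point?",
--         "What are some real-world applications?"
--     ]
--
--     assistant_responses = [
--         "Here's more detail on that topic: [explanation continues].",
--         "Let me explain further: [additional context provided].",
--         "To add to that: [more information shared].",
--         "Here's what you need to know: [knowledge expanded].",
--     ]
--
--     for turn in range(1, max_turns + 1):
--         conversation_turns[turn] = []
--
--         for initial_prompt in initial_prompts[:10]:  # Limit to avoid explosion
--             # Build conversation history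
--             conversation = f"User: {initial_prompt}\n"
--
--             for t in range(1, turn):
--                 # Add assistant response
--                 conversation += f"Assistant: {assistant_responses[t % len(assistant_responses)]}\n"
--                 # Add user follow-up
--                 conversation += f"User: {follow_ups[t % len(follow_ups)]}\n"
--
--             # Add final user turn (the actual prompt)
--             final_prompt = follow_ups[(turn - 1) % len(follow_ups)]
--             conversation += f"User: {final_prompt}"
--
--             conversation_turns[turn].append(conversation)
--
--     return conversation_turns
-- ===== SOURCE B (Python) =====
-- from typing import List, Dict
--
-- def create_conversation_turns(
--     initial_prompts: List[str],
--     max_turns: int = 5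
-- ) -> Dict[int, List[str]]:
--     """Same result as A, but the shared conversation history is extended
--     incrementally turn by turn instead of being rebuilt from scratch for
--     every (turn, prompt) pair."""
--     follow_ups = [
--         "Can you elaborate on that?",
--         "That's interesting. Tell me more.",
--         "I see. What else should I know?",
--         "Thanks! Can you give me an example?",
--         "How does that work in practice?",
--         "What are the key takeaways?",
--         "Could you clarify that point?",
--         "What are some real-world applications?"
--     ]
--     assistant_responses = [
--         "Here's more detail on that topic: [explanation continues].",
--         "Let me explain further: [additional context provided].",
--         "To add to that: [more information shared].",
--         "Here's what you need to know: [knowledge expanded].",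
--     ]
--     heads = [f"User: {p}\n" for p in initial_prompts[:10]]
--     result = {}
--     history = ""
--     for turn in range(1, max_turns + 1):
--         final = "User: " + follow_ups[(turn - 1) % len(follow_ups)]
--         result[turn] = [h + history + final for h in heads]
--         history += ("Assistant: " + assistant_responses[turn % len(assistant_responses)] + "\n"
--                     + "User: " + follow_ups[turn % len(follow_ups)] + "\n")
--     return result
-- ===== Notes on version B (the rewrite author's own statement) =====
-- stated objective: alternative
-- what changed: B precomputes the per-prompt head lines once and extends a single shared history string incrementally per turn, instead of rebuilding the whole conversation history from scratch for every (turn, prompt) pair with a nested loop.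
import Mathlib
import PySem

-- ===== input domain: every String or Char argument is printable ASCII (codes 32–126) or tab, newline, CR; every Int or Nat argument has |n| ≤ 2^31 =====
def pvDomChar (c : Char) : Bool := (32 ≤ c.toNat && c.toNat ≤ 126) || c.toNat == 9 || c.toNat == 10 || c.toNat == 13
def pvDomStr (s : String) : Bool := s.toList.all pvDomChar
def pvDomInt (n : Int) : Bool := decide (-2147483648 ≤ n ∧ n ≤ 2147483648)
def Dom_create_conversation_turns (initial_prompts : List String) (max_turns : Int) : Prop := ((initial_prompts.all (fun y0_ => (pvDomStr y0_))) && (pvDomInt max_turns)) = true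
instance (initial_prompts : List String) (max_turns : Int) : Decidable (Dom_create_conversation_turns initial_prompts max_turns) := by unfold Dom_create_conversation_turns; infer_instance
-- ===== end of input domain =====

-- B precomputes per-prompt head lines once and extends one shared history string per turn,
-- instead of rebuilding each conversation history from scratch per (turn, prompt) pair (objective: alternative).


-- ===== PORT A =====
-- the two literal string tables from the Python source (identical in A and B)
def pvFollowUps : List String := [
  "Can you elaborate on that?",
  "That's interesting. Tell me more.",
  "I see. What else should I know?",
  "Thanks! Can you give me an example?",
  "How does that work in practice?",
  "What are the key takeaways?",
  "Could you clarify that point?",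
  "What are some real-world applications?"]

def pvAssistantResponses : List String := [
  "Here's more detail on that topic: [explanation continues].",
  "Let me explain further: [additional context provided].",
  "To add to that: [more information shared].",
  "Here's what you need to know: [knowledge expanded]."]

-- follow_ups[t % len(follow_ups)]; the mod index is always in range, so the default is never used
def pvFup (t : Int) : String := PySem.List.pyGetD pvFollowUps (PySem.Int.mod t (pvFollowUps.length : Int)) ""
-- assistant_responses[t % len(assistant_responses)]
def pvResp (t : Int) : String := PySem.List.pyGetD pvAssistantResponses (PySem.Int.mod t (pvAssistantResponses.length : Int)) ""

-- body of A's outer `for turn in ...` loop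
def pvStepA (initial_prompts : List String) (d : PySem.Dict Int (List String)) (turn : Int) :
    PySem.Dict Int (List String) :=
  let d1 := d.insert turn ([] : List String)                      -- conversation_turns[turn] = []
  (PySem.List.slice initial_prompts (some 0) (some 10)).foldl (fun d2 initial_prompt =>
    let conv0 := "User: " ++ initial_prompt ++ "\n"
    let conv1 := (PySem.List.pyRange 1 turn 1).foldl (fun c t =>
      let c1 := c ++ ("Assistant: " ++ pvResp t ++ "\n")
      c1 ++ ("User: " ++ pvFup t ++ "\n")) conv0
    let final_prompt := pvFup (turn - 1)
    let conv2 := conv1 ++ ("User: " ++ final_prompt)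
    d2.modify turn [] (fun l => l ++ [conv2])) d1                 -- conversation_turns[turn].append(conversation)

def create_conversation_turns (initial_prompts : List String) (max_turns : Int) : List (Int × List String) :=
  ((PySem.List.pyRange 1 (max_turns + 1) 1).foldl (pvStepA initial_prompts) PySem.Dict.empty).items

-- ===== PORT B =====
-- body of B's single loop: emit this turn's entry, then extend the shared history
def pvStepB (heads : List String) (st : List (Int × List String) × String) (turn : Int) :
    List (Int × List String) × String :=
  let final := "User: " ++ pvFup (turn - 1)
  (st.1 ++ [(turn, heads.map (fun h => h ++ st.2 ++ final))],
   st.2 ++ (("Assistant: " ++ pvResp turn ++ "\n") ++ ("User: " ++ pvFup turn ++ "\n")))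

def create_conversation_turns_alt (initial_prompts : List String) (max_turns : Int) : List (Int × List String) :=
  let heads := (PySem.List.slice initial_prompts (some 0) (some 10)).map (fun p => "User: " ++ p ++ "\n")
  ((PySem.List.pyRange 1 (max_turns + 1) 1).foldl (pvStepB heads) ([], "")).1

-- ===== PRECONDITION & SPEC =====
def Spec_create_conversation_turns (initial_prompts : List String) (max_turns : Int) (out : List (Int × List String)) : Prop := out = create_conversation_turns_alt initial_prompts max_turns
instance (initial_prompts : List String) (max_turns : Int) (out : List (Int × List String)) : Decidable (Spec_create_conversation_turns initial_prompts max_turns out) := by unfold Spec_create_conversation_turns; infer_instance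

-- ===== CLAIM (what is proved, stated in full; the proofs are below) =====
def Claim_equal_create_conversation_turns : Prop := ∀ (initial_prompts : List String) (max_turns : Int), Dom_create_conversation_turns initial_prompts max_turns → Spec_create_conversation_turns initial_prompts max_turns (create_conversation_turns initial_prompts max_turns)

-- ===== LEMMAS AND PROOFS =====

-- one history block added by turn t
def pvG (t : Int) : String := ("Assistant: " ++ pvResp t ++ "\n") ++ ("User: " ++ pvFup t ++ "\n")

-- the accumulated history for a list of past turns
def pvH : List Int → String
  | [] => ""
  | t :: r => pvG t ++ pvH r

lemma pvH_append (l₁ l₂ : List Int) : pvH (l₁ ++ l₂) = pvH l₁ ++ pvH l₂ := by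
  induction l₁ with
  | nil => simp [pvH]
  | cons t r ih => simp [pvH, ih, String.append_assoc]

-- A's inner history loop pulls out of its accumulator
lemma pvConvFold (l : List Int) (s : String) :
    l.foldl (fun c t =>
      let c1 := c ++ ("Assistant: " ++ pvResp t ++ "\n")
      c1 ++ ("User: " ++ pvFup t ++ "\n")) s = s ++ pvH l := by
  induction l generalizing s with
  | nil => simp [pvH, String.append_empty]
  | cons t r ih =>
      rw [List.foldl_cons, ih]
      simp [pvH, pvG, String.append_assoc]

-- Set.update by elements already present is the identity
lemma pvSetUpdate_const {α : Type} [DecidableEq α] (s : PySem.Set α) (l : List α) (k : α)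
    (hk : k ∈ s) (hl : ∀ x ∈ l, x = k) : PySem.Set.update s l = s := by
  induction l with
  | nil => rfl
  | cons x r ih =>
      have hx : x = k := hl x (List.mem_cons_self ..)
      have : PySem.Set.add s x = s := by
        subst hx; simp [PySem.Set.add, PySem.Set.contains, hk]
      simp [PySem.Set.update, List.foldl_cons, this]
      exact ih (fun y hy => hl y (List.mem_cons_of_mem _ hy))

-- what one outer iteration of A does to the items list, for a fresh key
lemma pvStepA_items (ip : List String) (d : PySem.Dict Int (List String)) (k : Int)
    (hfresh : k ∉ d.keys) (hnd : d.keys.Nodup) :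
    (pvStepA ip d k).items
      = d.items ++ [(k, (PySem.List.slice ip (some 0) (some 10)).map (fun p =>
          (("User: " ++ p ++ "\n") ++ pvH (PySem.List.pyRange 1 k 1)) ++ ("User: " ++ pvFup (k - 1))))]
      ∧ (pvStepA ip d k).keys = d.keys ++ [k] := by
  set ps := PySem.List.slice ip (some 0) (some 10) with hps
  set F : String → String := fun p =>
    (("User: " ++ p ++ "\n") ++ pvH (PySem.List.pyRange 1 k 1)) ++ ("User: " ++ pvFup (k - 1)) with hF
  have hcont : d.contains k = false := by
    rw [← Bool.not_eq_true, PySem.Dict.contains_iff_mem_keys]; exact hfresh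
  have hki : (d.insert k ([] : List String)).keys = d.keys ++ [k] :=
    PySem.Dict.keys_insert_of_not_contains _ _ hcont
  have hfold : pvStepA ip d k
      = (ps.map (fun p => (k, F p))).foldl
          (fun d2 q => d2.modify q.1 [] (fun l => l ++ [q.2])) (d.insert k ([] : List String)) := by
    rw [List.foldl_map]
    unfold pvStepA
    simp only [pvConvFold, hF]
    rw [hps]
  have hkeys : (pvStepA ip d k).keys = d.keys ++ [k] := by
    rw [hfold, PySem.Dict.keys_foldl_modify_key, hki]
    refine pvSetUpdate_const _ _ k (by simp) ?_
    intro x hx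
    simp only [List.map_map, List.mem_map] at hx
    obtain ⟨p, -, hp⟩ := hx
    exact hp.symm
  refine ⟨?_, hkeys⟩
  have hndk : (pvStepA ip d k).keys.Nodup := by
    rw [hkeys]
    refine List.Nodup.append hnd (List.nodup_singleton _) ?_
    intro a ha hb
    rw [List.mem_singleton] at hb
    exact hfresh (hb ▸ ha)
  have hitems := PySem.Dict.items_eq_map_keys (pvStepA ip d k) hndk ([] : List String)
  rw [hitems, hkeys, List.map_append]
  have hget : ∀ j, (pvStepA ip d k).getD j ([] : List String)
      = (d.insert k ([] : List String)).getD j []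
        ++ (((ps.map (fun p => (k, F p))).filter (fun q => q.1 == j)).map (·.2)) := by
    intro j
    rw [hfold, PySem.Dict.getD_foldl_modify_append]
  congr 1
  · rw [PySem.Dict.items_eq_map_keys d hnd ([] : List String)]
    refine List.map_congr_left ?_
    intro j hj
    have hjk : j ≠ k := fun h => hfresh (h ▸ hj)
    have : (pvStepA ip d k).getD j ([] : List String) = d.getD j [] := by
      rw [hget j, PySem.Dict.getD_insert_of_ne _ _ _ hjk]
      have : ((ps.map (fun p => (k, F p))).filter (fun q => q.1 == j)) = [] := by
        rw [List.filter_eq_nil_iff]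
        intro q hq
        simp only [List.mem_map] at hq
        obtain ⟨p, -, hp⟩ := hq
        subst hp
        simp [hjk.symm]
      simp [this]
    rw [this]
  · have : (pvStepA ip d k).getD k ([] : List String) = ps.map F := by
      rw [hget k, PySem.Dict.getD_insert_self]
      have : ((ps.map (fun p => (k, F p))).filter (fun q => q.1 == k)) = ps.map (fun p => (k, F p)) := by
        rw [List.filter_eq_self]
        intro q hq
        simp only [List.mem_map] at hq
        obtain ⟨p, -, hp⟩ := hq
        subst hp; simp
      rw [this]
      simp [List.map_map]
    simp [this]

-- main loop invariant
lemma pvLoop (ip : List String) :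
    ∀ (n : Nat) (a b : Int), (b - a).toNat = n → 1 ≤ a →
    ∀ (d : PySem.Dict Int (List String)) (res : List (Int × List String)),
      d.items = res → d.keys.Nodup → (∀ x ∈ d.keys, x < a) →
      ((PySem.List.pyRange a b 1).foldl (pvStepA ip) d).items
        = ((PySem.List.pyRange a b 1).foldl
            (pvStepB ((PySem.List.slice ip (some 0) (some 10)).map (fun p => "User: " ++ p ++ "\n")))
            (res, pvH (PySem.List.pyRange 1 a 1))).1 := by
  intro n
  induction n with
  | zero =>
      intro a b hn _ d res hitems _ _
      rw [PySem.List.pyRange_one_eq_nil (by omega)]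
      simpa using hitems
  | succ n ih =>
      intro a b hn ha d res hitems hnd hlt
      have hab : a < b := by omega
      rw [PySem.List.pyRange_one_cons hab, List.foldl_cons, List.foldl_cons]
      have hfresh : a ∉ d.keys := fun h => lt_irrefl a (hlt a h)
      obtain ⟨hi, hk⟩ := pvStepA_items ip d a hfresh hnd
      have hstep : pvStepB ((PySem.List.slice ip (some 0) (some 10)).map (fun p => "User: " ++ p ++ "\n"))
          (res, pvH (PySem.List.pyRange 1 a 1)) a
          = (res ++ [(a, (PySem.List.slice ip (some 0) (some 10)).map (fun p =>
              (("User: " ++ p ++ "\n") ++ pvH (PySem.List.pyRange 1 a 1)) ++ ("User: " ++ pvFup (a - 1))))],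
             pvH (PySem.List.pyRange 1 (a + 1) 1)) := by
        unfold pvStepB
        rw [PySem.List.pyRange_one_succ_right (by omega : (1:Int) ≤ a), pvH_append]
        simp [List.map_map, pvH, pvG, String.append_empty, Function.comp]
      rw [hstep]
      refine ih (a + 1) b (by omega) (by omega) _ _ (by rw [hi, hitems]) ?_ ?_
      · rw [hk]
        refine List.Nodup.append hnd (List.nodup_singleton _) ?_
        intro x hx hb
        rw [List.mem_singleton] at hb
        exact hfresh (hb ▸ hx)
      · intro x hx
        rw [hk, List.mem_append, List.mem_singleton] at hx
        rcases hx with hx | hx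
        · exact lt_trans (hlt x hx) (by omega)
        · omega

-- ===== VERDICT (by name: the statement is the Claim_ definition above) =====
theorem create_conversation_turns_spec : Claim_equal_create_conversation_turns := by
  intro ip m _
  unfold Spec_create_conversation_turns create_conversation_turns create_conversation_turns_alt
  have h := pvLoop ip ((m + 1) - 1).toNat 1 (m + 1) rfl le_rfl PySem.Dict.empty [] rfl
    (by simp [PySem.Dict.keys_empty]) (by simp [PySem.Dict.keys_empty])
  simpa [PySem.List.pyRange_one_eq_nil, pvH, PySem.Dict.items] using h
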